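-- pv_equiv track=rewrite | github.com/clifford-cheng/WealthPipeline | wealth_leads/serve.py | _find_profile
-- ===== SOURCE A (Python) =====
-- from typing import Any, Optional
--
-- def _norm_person_name(name: str) -> str:
--     s = (name or "").lower().replace(".", " ")
--     return " ".join(s.split())
--
-- def _find_profile(profiles: list[dict], cik: str, norm_name: str) -> Optional[dict]:
--     cik_s = str(cik or "").strip()
--     want = (norm_name or "").strip()
--     for p in profiles:
--         if str(p.get("cik") or "").strip() != cik_s:
--             continue
--         if (p.get("norm_name") or "").strip() == want:
--             return p
--     for p in profiles:
--         if str(p.get("cik") or "").strip() != cik_s: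
--             continue
--         if _norm_person_name(p.get("display_name") or "") == want:
--             return p
--     return None
-- ===== SOURCE B (Python) =====
-- from typing import Any, Optional
--
-- def _norm_person_name(name: str) -> str:
--     s = (name or "").lower().replace(".", " ")
--     return " ".join(s.split())
--
-- def _find_profile(profiles: list[dict], cik: str, norm_name: str) -> Optional[dict]:
--     cik_s = str(cik or "").strip()
--     want = (norm_name or "").strip()
--     fallback = None
--     for p in profiles:
--         if str(p.get("cik") or "").strip() != cik_s:
--             continue
--         if (p.get("norm_name") or "").strip() == want:
--             return p
--         if fallback is None and _norm_person_name(p.get("display_name") or "") == want: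
--             fallback = p
--     return fallback
-- ===== Notes on version B (the rewrite author's own statement) =====
-- stated objective: simpler
-- what changed: Replaces A's two full scans of the profile list by a single pass that returns eagerly on a norm_name match and keeps the first display_name match in a fallback accumulator.
import Mathlib
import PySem

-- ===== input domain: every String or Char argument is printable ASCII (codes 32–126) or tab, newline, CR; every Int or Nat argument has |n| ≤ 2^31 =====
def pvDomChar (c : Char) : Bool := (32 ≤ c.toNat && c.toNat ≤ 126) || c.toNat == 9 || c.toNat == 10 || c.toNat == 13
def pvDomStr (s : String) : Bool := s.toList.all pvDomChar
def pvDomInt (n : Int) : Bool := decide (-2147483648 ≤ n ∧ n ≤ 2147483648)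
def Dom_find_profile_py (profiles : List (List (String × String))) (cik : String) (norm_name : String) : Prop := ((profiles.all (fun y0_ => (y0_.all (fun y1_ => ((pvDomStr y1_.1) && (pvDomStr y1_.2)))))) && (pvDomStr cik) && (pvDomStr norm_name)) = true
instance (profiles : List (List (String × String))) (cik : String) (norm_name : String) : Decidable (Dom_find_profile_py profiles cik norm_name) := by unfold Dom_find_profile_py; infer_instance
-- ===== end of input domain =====

-- B is a single pass with a fallback accumulator instead of A's two full scans; same results.

-- ===== PORT A =====
-- p.get(k) or "" : first-match lookup in the association list, "" when missing ("" or None both become "")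
def pvGetS (p : List (String × String)) (k : String) : String :=
  ((PySem.Dict.mk p).get? k).getD ""

-- _norm_person_name
def normPersonName (name : String) : String :=
  PySem.Str.join " " (PySem.Str.split₀ (PySem.Str.replace (PySem.Str.lower name) "." " "))

-- first loop of A: cik matches and stripped norm_name equals want
def pvLoop1 (cik_s want : String) : List (List (String × String)) → Option (List (String × String))
  | [] => none
  | p :: ps =>
    if PySem.Str.strip (pvGetS p "cik") ≠ cik_s then pvLoop1 cik_s want ps
    else if PySem.Str.strip (pvGetS p "norm_name") = want then some p
    else pvLoop1 cik_s want ps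

-- second loop of A: cik matches and normalised display_name equals want
def pvLoop2 (cik_s want : String) : List (List (String × String)) → Option (List (String × String))
  | [] => none
  | p :: ps =>
    if PySem.Str.strip (pvGetS p "cik") ≠ cik_s then pvLoop2 cik_s want ps
    else if normPersonName (pvGetS p "display_name") = want then some p
    else pvLoop2 cik_s want ps

def find_profile_py (profiles : List (List (String × String))) (cik : String) (norm_name : String) : Option (List (String × String)) :=
  let cik_s := PySem.Str.strip cik
  let want := PySem.Str.strip norm_name
  match pvLoop1 cik_s want profiles with
  | some p => some p
  | none => pvLoop2 cik_s want profiles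

-- ===== PORT B =====
-- single pass: return eagerly on a norm_name match, remember the first display_name match
def pvLoopB (cik_s want : String) : List (List (String × String)) → Option (List (String × String)) → Option (List (String × String))
  | [], fallback => fallback
  | p :: ps, fallback =>
    if PySem.Str.strip (pvGetS p "cik") ≠ cik_s then pvLoopB cik_s want ps fallback
    else if PySem.Str.strip (pvGetS p "norm_name") = want then some p
    else pvLoopB cik_s want ps
      (if fallback.isNone ∧ normPersonName (pvGetS p "display_name") = want then some p else fallback)

def find_profile_py_alt (profiles : List (List (String × String))) (cik : String) (norm_name : String) : Option (List (String × String)) :=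
  pvLoopB (PySem.Str.strip cik) (PySem.Str.strip norm_name) profiles none

-- ===== PRECONDITION & SPEC =====
def Spec_find_profile_py (profiles : List (List (String × String))) (cik : String) (norm_name : String) (out : Option (List (String × String))) : Prop := out = find_profile_py_alt profiles cik norm_name
instance (profiles : List (List (String × String))) (cik : String) (norm_name : String) (out : Option (List (String × String))) : Decidable (Spec_find_profile_py profiles cik norm_name out) := by unfold Spec_find_profile_py; infer_instance

-- ===== CLAIM (what is proved, stated in full; the proofs are below) =====
def Claim_equal_find_profile_py : Prop := ∀ (profiles : List (List (String × String))) (cik : String) (norm_name : String), Dom_find_profile_py profiles cik norm_name → Spec_find_profile_py profiles cik norm_name (find_profile_py profiles cik norm_name)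

-- ===== LEMMAS AND PROOFS =====
-- the single pass equals: first loop-1 hit, else the fallback, else the first loop-2 hit
theorem pvLoopB_eq (cik_s want : String) (ps : List (List (String × String)))
    (fb : Option (List (String × String))) :
    pvLoopB cik_s want ps fb =
      match pvLoop1 cik_s want ps with
      | some p => some p
      | none => match fb with
                | some f => some f
                | none => pvLoop2 cik_s want ps := by
  induction ps generalizing fb with
  | nil => cases fb <;> simp [pvLoopB, pvLoop1, pvLoop2]
  | cons p ps ih =>
    simp only [pvLoopB, pvLoop1, pvLoop2]
    by_cases h1 : PySem.Str.strip (pvGetS p "cik") ≠ cik_s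
    · simp [h1, ih]
    · by_cases h2 : PySem.Str.strip (pvGetS p "norm_name") = want
      · simp [h1, h2]
      · by_cases h3 : normPersonName (pvGetS p "display_name") = want
        · cases fb <;> simp [h1, h2, h3, ih] <;> cases pvLoop1 cik_s want ps <;> simp
        · cases fb <;> simp [h1, h2, h3, ih]

theorem find_profile_py_spec : Claim_equal_find_profile_py := by
  intro profiles cik norm_name _
  unfold Spec_find_profile_py find_profile_py find_profile_py_alt
  rw [pvLoopB_eq]

-- ===== VERDICT (by name: the statement is the Claim_ definition above) =====
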